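-- pv_equiv track=rewrite | github.com/CIROH-UVM/forecast-workflow | gfs_download_fcns.py | generate_hours_list
-- ===== SOURCE A (Python) =====
-- def generate_hours_list(num_days):
--     hours_list = []
--     hour = 0
--     hours_list.append(f"{hour:03}")
--     for day in range(1, num_days + 1):
--         if day <= 5:
--             for h in range(24):
--                 hour += 1
--                 hours_list.append(f"{hour:03}")
--         else:
--             for h in range(8):
--                 hour += 3
--                 hours_list.append(f"{hour:03}")
--     return hours_list
-- ===== SOURCE B (Python) =====
-- def generate_hours_list(num_days):
--     hours = [0]
--     hours.extend(range(1, min(num_days, 5) * 24 + 1))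
--     if num_days > 5:
--         hours.extend(range(123, 120 + 24 * (num_days - 5) + 1, 3))
--     return [f"{h:03}" for h in hours]
-- ===== Notes on version B (the rewrite author's own statement) =====
-- stated objective: simpler
-- what changed: Replaces the nested per-day/per-hour accumulator loops with two closed-form arithmetic ranges (hourly part and 3-hourly part) and a single map of the zero-padded format over the collected integers.
import Mathlib
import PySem

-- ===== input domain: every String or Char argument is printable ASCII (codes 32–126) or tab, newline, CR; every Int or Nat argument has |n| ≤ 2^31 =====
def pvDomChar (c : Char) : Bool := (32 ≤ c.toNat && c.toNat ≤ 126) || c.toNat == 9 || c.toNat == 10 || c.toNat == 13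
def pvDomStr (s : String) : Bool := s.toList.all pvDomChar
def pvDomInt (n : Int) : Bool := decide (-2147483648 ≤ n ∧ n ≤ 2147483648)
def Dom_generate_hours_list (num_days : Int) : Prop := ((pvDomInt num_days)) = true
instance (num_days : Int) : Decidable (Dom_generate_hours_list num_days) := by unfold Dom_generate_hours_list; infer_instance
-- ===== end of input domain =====

-- B replaces A's nested accumulator loops by two closed-form arithmetic ranges plus one map (simpler decomposition).

-- f"{h:03}" (shared f-string of both Pythons): str(h) zero-padded to width 3
def pvFmt (h : Int) : String := PySem.Str.zfill (PySem.Int.toStr h) 3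

-- ===== PORT A =====
def generate_hours_list (num_days : Int) : List String :=
  ((PySem.List.pyRange 1 (num_days + 1) 1).foldl
      (fun (st : List String × Int) day =>
        if day ≤ 5 then
          (PySem.List.pyRange 0 24 1).foldl
            (fun (st : List String × Int) _h => (st.1 ++ [pvFmt (st.2 + 1)], st.2 + 1)) st
        else
          (PySem.List.pyRange 0 8 1).foldl
            (fun (st : List String × Int) _h => (st.1 ++ [pvFmt (st.2 + 3)], st.2 + 3)) st)
      ([pvFmt 0], (0 : Int))).1

-- ===== PORT B =====
def generate_hours_list_alt (num_days : Int) : List String :=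
  let hours : List Int := 0 :: PySem.List.pyRange 1 (min num_days 5 * 24 + 1) 1
  let hours := if 5 < num_days then
      hours ++ PySem.List.pyRange 123 (120 + 24 * (num_days - 5) + 1) 3
    else hours
  hours.map pvFmt

-- ===== PRECONDITION & SPEC =====
def Spec_generate_hours_list (num_days : Int) (out : List String) : Prop := out = generate_hours_list_alt num_days
instance (num_days : Int) (out : List String) : Decidable (Spec_generate_hours_list num_days out) := by unfold Spec_generate_hours_list; infer_instance

-- ===== CLAIM (what is proved, stated in full; the proofs are below) =====
def Claim_equal_generate_hours_list : Prop := ∀ (num_days : Int), Dom_generate_hours_list num_days → Spec_generate_hours_list num_days (generate_hours_list num_days)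

-- ===== LEMMAS AND PROOFS =====

-- the integer hours B collects, and the running hour after processing n days
def pvInts (n : Int) : List Int :=
  (0 :: PySem.List.pyRange 1 (min n 5 * 24 + 1) 1) ++
    (if 5 < n then PySem.List.pyRange 123 (120 + 24 * (n - 5) + 1) 3 else [])

def pvHour (n : Int) : Int := if n ≤ 5 then 24 * n else 120 + 24 * (n - 5)

lemma alt_eq_pvInts (n : Int) : generate_hours_list_alt n = (pvInts n).map pvFmt := by
  unfold generate_hours_list_alt pvInts
  by_cases h : 5 < n <;> simp [h]

-- the inner 'for h in range(k)' loop with step s, as a map over List.range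
lemma inner_fold (s : Int) (L : List Int) (l : List String) (h : Int) :
    L.foldl (fun (st : List String × Int) _ => (st.1 ++ [pvFmt (st.2 + s)], st.2 + s)) (l, h)
      = (l ++ (List.range L.length).map (fun k : Nat => pvFmt (h + ((k : Int) + 1) * s)),
         h + (L.length : Int) * s) := by
  induction L generalizing l h with
  | nil => simp
  | cons x xs ih =>
    simp only [List.foldl_cons, List.length_cons]
    rw [ih]
    refine Prod.ext ?_ ?_
    · show l ++ [pvFmt (h + s)] ++ _ = l ++ _
      rw [List.append_assoc]
      congr 1
      rw [List.range_succ_eq_map, List.map_cons, List.map_map, List.singleton_append]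
      simp only [Nat.cast_zero, zero_add, one_mul]
      congr 1
      apply List.map_congr_left
      intro k _
      simp only [Function.comp_apply]
      congr 1
      push_cast
      ring
    · show h + s + (xs.length : Int) * s = h + ((xs.length : Int) + 1) * s
      ring

lemma outer_fold (n : Int) (hn : 0 ≤ n) :
    (PySem.List.pyRange 1 (n + 1) 1).foldl
      (fun (st : List String × Int) day =>
        if day ≤ 5 then
          (PySem.List.pyRange 0 24 1).foldl
            (fun (st : List String × Int) _h => (st.1 ++ [pvFmt (st.2 + 1)], st.2 + 1)) st
        else
          (PySem.List.pyRange 0 8 1).foldl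
            (fun (st : List String × Int) _h => (st.1 ++ [pvFmt (st.2 + 3)], st.2 + 3)) st)
      ([pvFmt 0], (0 : Int)) = ((pvInts n).map pvFmt, pvHour n) := by
  induction n, hn using Int.le_induction with
  | base =>
    simp [pvInts, pvHour, PySem.List.pyRange_one_eq_nil]
  | succ n hn ih =>
    rw [PySem.List.pyRange_one_succ_right (by omega), List.foldl_append, ih, List.foldl_cons,
      List.foldl_nil]
    by_cases h5 : n + 1 ≤ 5
    · rw [if_pos h5, inner_fold]
      have hlen : (PySem.List.pyRange 0 24 1).length = 24 := by
        rw [PySem.List.length_pyRange_one]; rfl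
      rw [hlen]
      have hmin : min n 5 = n := by omega
      have hmin' : min (n + 1) 5 = n + 1 := by omega
      have hno : ¬ (5 < n) := by omega
      have hno' : ¬ (5 < n + 1) := by omega
      refine Prod.ext ?_ ?_
      · show (pvInts n).map pvFmt ++ _ = _
        unfold pvInts pvHour
        rw [if_neg hno, if_neg hno', hmin, hmin']
        rw [PySem.List.pyRange_one_append 1 (n * 24 + 1) ((n + 1) * 24 + 1) (by omega) (by omega)]
        simp only [List.append_nil, List.map_cons, List.map_append, List.cons_append]
        congr 1
        congr 1
        rw [PySem.List.pyRange_one (n * 24 + 1) ((n + 1) * 24 + 1)]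
        have : ((n + 1) * 24 + 1 - (n * 24 + 1)).toNat = 24 := by omega
        rw [this, List.map_map]
        apply List.map_congr_left
        intro k _
        simp only [Function.comp_apply]
        have hle : n ≤ 5 := by omega
        rw [if_pos hle]
        congr 1
        ring
      · show pvHour n + 24 * 1 = pvHour (n + 1)
        unfold pvHour
        rw [if_pos (by omega : n ≤ 5), if_pos h5]
        ring
    · rw [if_neg h5, inner_fold]
      have hlen : (PySem.List.pyRange 0 8 1).length = 8 := by
        rw [PySem.List.length_pyRange_one]; rfl
      rw [hlen]
      have hmin : min n 5 = 5 := by omega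
      have hmin' : min (n + 1) 5 = 5 := by omega
      have hyes' : 5 < n + 1 := by omega
      have hh : pvHour n = 120 + 24 * (n - 5) := by
        unfold pvHour
        by_cases h : n ≤ 5
        · rw [if_pos h]; omega
        · rw [if_neg h]
      refine Prod.ext ?_ ?_
      · show (pvInts n).map pvFmt ++ _ = _
        unfold pvInts
        rw [hmin, hmin', if_pos hyes', hh]
        simp only [List.map_cons, List.map_append, List.cons_append, List.append_assoc]
        congr 2
        have hcomp : (fun k : Nat => pvFmt (120 + 24 * (n - 5) + ((k : Int) + 1) * 3))
            = pvFmt ∘ (fun k : Nat => 120 + 24 * (n - 5) + ((k : Int) + 1) * 3) := rfl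
        rw [hcomp, ← List.map_map, ← List.map_append]
        congr 1
        -- step-3 ranges as maps over List.range
        have hrep : ∀ d : Int, 0 ≤ d →
            PySem.List.pyRange 123 (120 + 24 * d + 1) 3
              = (List.range (24 * d.toNat / 3)).map (fun k : Nat => 123 + 3 * (k : Int)) := by
          intro d hd
          rw [PySem.List.pyRange_of_pos 123 (120 + 24 * d + 1) (by omega)]
          congr 1
          by_cases hd1 : (123 : Int) < 120 + 24 * d + 1
          · rw [if_pos hd1]; congr 1; omega
          · rw [if_neg hd1]; congr 1; omega
        by_cases h6 : 5 < n
        · rw [if_pos h6, hrep (n - 5) (by omega), hrep (n + 1 - 5) (by omega)]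
          have hsplit : (24 * (n + 1 - 5).toNat / 3) = (24 * (n - 5).toNat / 3) + 8 := by omega
          rw [hsplit, List.range_add, List.map_append, List.map_map]
          congr 1
          apply List.map_congr_left
          intro k hk
          simp only [Function.comp_apply]
          omega
        · have hn5 : n = 5 := by omega
          subst hn5
          rw [if_neg h6, hrep (5 + 1 - 5) (by omega)]
          simp only [List.nil_append]
          apply List.map_congr_left
          intro k hk
          omega
      · show pvHour n + 8 * 3 = pvHour (n + 1)
        unfold pvHour
        split_ifs <;> omega

-- ===== VERDICT (by name: the statement is the Claim_ definition above) =====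
theorem generate_hours_list_spec : Claim_equal_generate_hours_list := by
  intro num_days _
  unfold Spec_generate_hours_list
  rw [alt_eq_pvInts]
  by_cases hn : 0 ≤ num_days
  · unfold generate_hours_list
    rw [outer_fold num_days hn]
  · have h1 : PySem.List.pyRange 1 (num_days + 1) 1 = [] :=
      PySem.List.pyRange_one_eq_nil (by omega)
    have h2 : PySem.List.pyRange 1 (min num_days 5 * 24 + 1) 1 = [] :=
      PySem.List.pyRange_one_eq_nil (by omega)
    unfold generate_hours_list pvInts
    rw [h1, h2, if_neg (by omega : ¬ (5 < num_days))]
    simp
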